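-- pv_equiv track=rewrite | github.com/Will-X-Yuanyuan/Card-Player | phase_type.py | same_value
-- ===== SOURCE A (Python) =====
-- def same_value(group):
--     '''checks whether the cards have the same value.
--     Return True if yes. False otherwise.'''
--     same_value = True
--
--     # set a test value, but this test value cannot be Ace
--     test_value = ''
--     for card in group:
--         if card[0] != 'A':
--             test_value = card[0]
--             break
--
--     for card in group:
--         if card[0] != 'A' and card[0]!= test_value:
--             same_value = False
--     return same_value
-- ===== SOURCE B (Python) =====
-- def same_value(group):
--     '''checks whether the cards have the same value.
--     Return True if yes. False otherwise.'''
--     values = {card[0] for card in group if card[0] != 'A'}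
--     return len(values) <= 1
-- ===== Notes on version B (the rewrite author's own statement) =====
-- stated objective: simpler
-- what changed: Replaced A's two passes (find a non-Ace reference value with break, then flag mismatches) by one set comprehension collecting the distinct non-Ace values and checking its cardinality is at most 1.
import Mathlib
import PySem

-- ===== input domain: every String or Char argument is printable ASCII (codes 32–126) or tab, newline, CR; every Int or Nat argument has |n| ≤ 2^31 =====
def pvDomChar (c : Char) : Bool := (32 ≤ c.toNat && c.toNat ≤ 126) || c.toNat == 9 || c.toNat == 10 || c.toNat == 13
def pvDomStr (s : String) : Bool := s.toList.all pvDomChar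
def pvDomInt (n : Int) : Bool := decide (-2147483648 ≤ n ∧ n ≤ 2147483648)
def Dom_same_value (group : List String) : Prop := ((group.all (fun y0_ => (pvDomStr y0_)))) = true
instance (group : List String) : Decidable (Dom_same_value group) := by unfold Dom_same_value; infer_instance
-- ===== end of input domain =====

-- B replaces A's reference-value-and-break scheme by a set of distinct non-Ace values
-- and a cardinality check; objective: simpler. Equal return value on all groups of
-- nonempty strings (both Pythons raise IndexError on an empty string, excluded by Pre_).

-- ===== PORT A =====
-- card[0]; exact (equals the character Python returns) whenever the string is nonempty (Pre_)
def pvFirst (s : String) : Char := (PySem.Str.pyGet? s 0).getD ' '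

-- the first for-loop with its break: first non-Ace first character, none if every card is an Ace
-- (Python's test_value stays '', which no one-character card[0] can equal — modelled by `none`)
def pvFindTest : List String → Option Char
  | [] => none
  | card :: rest => if pvFirst card ≠ 'A' then some (pvFirst card) else pvFindTest rest

def same_value (group : List String) : Bool :=
  let test_value := pvFindTest group
  group.foldl
    (fun sv card =>
      if pvFirst card ≠ 'A' ∧ some (pvFirst card) ≠ test_value then false else sv)
    true

-- ===== PORT B =====
def same_value_alt (group : List String) : Bool :=
  let values : PySem.Set Char :=
    PySem.Set.ofList (group.filterMap
      (fun card => if pvFirst card ≠ 'A' then some (pvFirst card) else none))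
  decide (values.length ≤ 1)

-- ===== PRECONDITION & SPEC =====
-- A (card[0]) raises IndexError on any empty string in the group; B raises there too.
def Pre_same_value (group : List String) : Prop := ∀ s ∈ group, s ≠ ""
instance (group : List String) : Decidable (Pre_same_value group) := by
  unfold Pre_same_value; infer_instance
def pvWitness_same_value : List String := ["2h", "2d", "Ac"]

def Spec_same_value (group : List String) (out : Bool) : Prop := out = same_value_alt group
instance (group : List String) (out : Bool) : Decidable (Spec_same_value group out) := by
  unfold Spec_same_value; infer_instance

-- ===== CLAIM (what is proved, stated in full; the proofs are below) =====
def Claim_equal_same_value : Prop :=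
  ∀ (group : List String), Dom_same_value group → Pre_same_value group →
    Spec_same_value group (same_value group)

-- ===== LEMMAS AND PROOFS =====

def pvF (card : String) : Option Char :=
  if pvFirst card ≠ 'A' then some (pvFirst card) else none

theorem pvFindTest_head (g : List String) :
    pvFindTest g = (g.filterMap pvF).head? := by
  induction g with
  | nil => rfl
  | cons card rest ih =>
    by_cases h : pvFirst card ≠ 'A' <;> simp [pvFindTest, pvF, h, ih]

theorem pvLoopA (t : Option Char) (g : List String) (b : Bool) :
    g.foldl
      (fun sv card =>
        if pvFirst card ≠ 'A' ∧ some (pvFirst card) ≠ t then false else sv) b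
    = (b && (g.filterMap pvF).all (fun v => some v == t)) := by
  induction g generalizing b with
  | nil => simp
  | cons card rest ih =>
    simp only [List.foldl_cons]
    by_cases hA : pvFirst card ≠ 'A'
    · by_cases ht : some (pvFirst card) ≠ t
      · rw [if_pos ⟨hA, ht⟩, ih]
        have hbeq : (some (pvFirst card) == t) = false := by
          simpa using ht
        simp [pvF, hA, hbeq]
      · rw [if_neg (by tauto), ih]
        simp only [not_not] at ht
        subst ht
        simp [pvF, hA]
    · rw [if_neg (by tauto), ih]
      simp only [not_not] at hA
      simp [pvF, hA]

theorem pvSetCard (l : List Char) :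
    ((PySem.Set.ofList l).length ≤ 1) ↔ (∀ v ∈ l, some v = l.head?) := by
  have hmem : ∀ x, x ∈ PySem.Set.ofList l ↔ x ∈ l := fun x => PySem.Set.mem_ofList l x
  have hnd : (PySem.Set.ofList l).Nodup := PySem.Set.nodup_ofList l
  constructor
  · intro hlen v hv
    cases l with
    | nil => cases hv
    | cons a rest =>
      have hva : v ∈ PySem.Set.ofList (a :: rest) := (hmem v).2 hv
      have haa : a ∈ PySem.Set.ofList (a :: rest) := (hmem a).2 (by simp)
      match hs : PySem.Set.ofList (a :: rest) with
      | [] => rw [hs] at hva; cases hva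
      | [c] =>
        rw [hs] at hva haa
        simp at hva haa
        simp [hva, haa]
      | c :: d :: t => rw [hs] at hlen; simp at hlen
  · intro hall
    cases l with
    | nil => simp [PySem.Set.ofList]
    | cons a rest =>
      match hs : PySem.Set.ofList (a :: rest) with
      | [] => simp
      | [c] => simp
      | c :: d :: t =>
        exfalso
        have hc : c ∈ a :: rest := (hmem c).1 (by rw [hs]; simp)
        have hd : d ∈ a :: rest := (hmem d).1 (by rw [hs]; simp)
        have hca : some c = some a := by simpa using hall c hc
        have hda : some d = some a := by simpa using hall d hd
        rw [hs] at hnd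
        simp at hnd
        exact hnd.1.1 (by simpa using hca.trans hda.symm)

-- ===== VERDICT (by name: the statement is the Claim_ definition above) =====
theorem same_value_spec : Claim_equal_same_value := by
  intro group _ _
  unfold Spec_same_value same_value same_value_alt
  rw [pvLoopA, pvFindTest_head, Bool.true_and]
  show _ = decide ((PySem.Set.ofList (group.filterMap pvF)).length ≤ 1)
  by_cases h : (PySem.Set.ofList (group.filterMap pvF)).length ≤ 1
  · rw [decide_eq_true h]
    rw [List.all_eq_true]
    intro v hv
    have := (pvSetCard (group.filterMap pvF)).1 h v hv
    simpa using this
  · rw [decide_eq_false h]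
    cases hb : (group.filterMap pvF).all (fun v => some v == (group.filterMap pvF).head?) with
    | false => rfl
    | true =>
      exfalso
      apply h
      apply (pvSetCard (group.filterMap pvF)).2
      intro v hv
      have := List.all_eq_true.1 hb v hv
      simpa using this
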